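-- pv_equiv track=rewrite | github.com/bog-walk/project-euler-python | solution/batch7/problem78.py | coin_pile_combos_theorem
-- ===== SOURCE A (Python) =====
-- modulus = 1_000_000_007
--
-- def coin_pile_combos_theorem(limit: int, mod_value: int = modulus) -> list[int]:
--     """
--     Solution is based on the Pentagonal Number Theorem that states:
--
--     (1 - x)(1 - x^2)(1 - x^3)... =
--                             1 - x - x^2 + x^5 + x^7 - x^12 - x^15 + x^22 + x^26 - ...
--
--     The right-side exponents are generalised pentagonal numbers given by the formula:
--
--     g_k = k(3k - 1) / 2, for k = 1, -1, 2, -2, 3, -3, ...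
--
--     This holds as an identity for calculating the number of partitions of limit
--     based on:
--
--     p(n) = p(n - 1) + p(n - 2) - p(n - 5) - p(n - 7) + ..., which is expressed as:
--
--     p(n) = Sigma{k!=0} ((-1)^{k-1} * p(n - g_k))
--
--     SPEED (BETTER)
--         17.47ms for N = 1e3
--     SPEED (BETTER)
--         582.54s for N = 1e4
--
--     :returns: List of partitions (mod 1e9 + 7) of all N <= limit, with
--         index == N.
--     """
--
--     partitions = [1] + [0]*limit
--     for n in range(1, limit + 1):
--         count = 0
--         k = 1
--         while True:
--             pentagonal = k * (3 * k - 1) // 2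
--             if pentagonal > n:
--                 break
--             if k % 2 == 1:
--                 count += partitions[n-pentagonal]
--             else:
--                 count -= partitions[n-pentagonal]
--             k *= -1
--             if k > 0:
--                 k += 1
--         partitions[n] = count % mod_value
--     return partitions
-- ===== SOURCE B (Python) =====
-- modulus = 1_000_000_007
--
-- def coin_pile_combos_theorem(limit: int, mod_value: int = modulus) -> list[int]:
--     # Same pentagonal-number recurrence, decomposed differently: the signed
--     # generalized pentagonal numbers are precomputed once (instead of being
--     # regenerated by sign-flipping k inside every outer iteration), and the
--     # partition values are obtained top-down by a memoized recursive helper.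
--     gpents = []
--     j = 1
--     while j * (3 * j - 1) // 2 <= limit:
--         sign = 1 if j % 2 == 1 else -1
--         gpents.append((j * (3 * j - 1) // 2, sign))
--         if j * (3 * j + 1) // 2 <= limit:
--             gpents.append((j * (3 * j + 1) // 2, sign))
--         j += 1
--
--     memo = {0: 1}
--
--     def p(n: int) -> int:
--         if n in memo:
--             return memo[n]
--         total = 0
--         get = memo.get
--         for g, sign in gpents:
--             if g > n:
--                 break
--             v = get(n - g)
--             if v is None:
--                 v = p(n - g)
--             total += sign * v
--         result = total % mod_value
--         memo[n] = result
--         return result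
--
--     return [1] + [p(n) for n in range(1, limit + 1)]
-- ===== Notes on version B (the rewrite author's own statement) =====
-- stated objective: alternative
-- what changed: B precomputes the signed generalized pentagonal numbers once as a list (instead of regenerating them by sign-flipping k inside every outer iteration) and obtains each partition value from a top-down memoized recursive helper over a dict, emitting the result list as [1] plus a comprehension, instead of A's preallocated array filled by an index-assignment loop with an inner while.
import Mathlib
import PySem

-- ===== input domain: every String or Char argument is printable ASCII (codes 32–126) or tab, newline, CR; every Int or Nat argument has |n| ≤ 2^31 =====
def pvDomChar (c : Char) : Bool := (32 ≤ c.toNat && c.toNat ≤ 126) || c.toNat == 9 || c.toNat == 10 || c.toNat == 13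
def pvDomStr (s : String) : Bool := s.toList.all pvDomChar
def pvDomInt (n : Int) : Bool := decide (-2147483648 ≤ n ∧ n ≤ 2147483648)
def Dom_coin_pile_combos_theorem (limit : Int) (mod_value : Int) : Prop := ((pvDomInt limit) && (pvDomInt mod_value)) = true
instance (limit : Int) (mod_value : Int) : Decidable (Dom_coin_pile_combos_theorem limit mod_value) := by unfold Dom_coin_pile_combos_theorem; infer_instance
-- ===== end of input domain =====

-- B restructures A's pentagonal-recurrence loop: the signed generalized pentagonal
-- numbers are precomputed once and the partition values come from a memoized
-- top-down helper over a dict (objective: alternative decomposition, same cost).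


-- ===== PORT A =====
-- A's inner 'while True' loop; fuel only makes the recursion structural (with the
-- fuel supplied below it is never exhausted: the pentagonal numbers grow past n).
-- Every reachable read partitions[n - pentagonal] has 0 ≤ n - pentagonal < len,
-- so pyGetD is exact here.
def pvA_inner (partitions : List Int) (n : Int) (count : Int) (k : Int) : Nat → Int
  | 0 => count
  | fuel + 1 =>
    let pentagonal := PySem.Int.floordiv (k * (3 * k - 1)) 2
    if pentagonal > n then count
    else
      let count' := if PySem.Int.mod k 2 = 1
        then count + PySem.List.pyGetD partitions (n - pentagonal) 0
        else count - PySem.List.pyGetD partitions (n - pentagonal) 0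
      let k1 := k * -1
      let k2 := if k1 > 0 then k1 + 1 else k1
      pvA_inner partitions n count' k2 fuel

def coin_pile_combos_theorem (limit : Int) (mod_value : Int) : List Int :=
  let partitions : List Int := 1 :: List.replicate limit.toNat 0  -- [1] + [0]*limit
  (PySem.List.pyRange 1 (limit + 1) 1).foldl
    (fun partitions n =>
      -- partitions[n] = count % mod_value, with 1 ≤ n ≤ limit < len: pySetD is exact
      PySem.List.pySetD partitions n
        (PySem.Int.mod (pvA_inner partitions n 0 1 (2 * n.toNat + 2)) mod_value))
    partitions

-- ===== PORT B =====
-- B's 'while' building gpents; fuel limit.toNat + 1 suffices (the loop stops by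
-- j = limit + 1 since j(3j-1)/2 ≥ j)
def pvB_gpents (limit : Int) (j : Int) : Nat → List (Int × Int)
  | 0 => []
  | fuel + 1 =>
    if PySem.Int.floordiv (j * (3 * j - 1)) 2 ≤ limit then
      let sign : Int := if PySem.Int.mod j 2 = 1 then 1 else -1
      let one := [(PySem.Int.floordiv (j * (3 * j - 1)) 2, sign)]
      let entries := if PySem.Int.floordiv (j * (3 * j + 1)) 2 ≤ limit
        then one ++ [(PySem.Int.floordiv (j * (3 * j + 1)) 2, sign)]
        else one
      entries ++ pvB_gpents limit (j + 1) fuel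
    else []

mutual
  -- B's memoized recursive p(n); the memo dict is threaded through in Python
  -- mutation order; fuel only makes the recursion structural (each recursive call
  -- decreases n by ≥ 1, so the fuel supplied below is never exhausted; a memo hit
  -- consumes no fuel, like the dict lookup in Python)
  def pvB_p (gp : List (Int × Int)) (mv : Int) (memo : PySem.Dict Int Int) (n : Int)
      (fuel : Nat) : Int × PySem.Dict Int Int :=
    match PySem.Dict.get? memo n with
    | some v => (v, memo)
    | none =>
      match fuel with
      | 0 => (0, memo)
      | fuel + 1 =>
        let r := pvB_loop gp mv memo n gp 0 fuel
        let result := PySem.Int.mod r.1 mv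
        (result, PySem.Dict.insert r.2 n result)
  termination_by (fuel, 0)
  -- B's 'for g, sign in gpents' loop with its break; 'v = get(n - g)' is the
  -- memo.get lookup (None = missing key, so Option), and only a miss recurses
  def pvB_loop (gp : List (Int × Int)) (mv : Int) (memo : PySem.Dict Int Int) (n : Int)
      (rem : List (Int × Int)) (total : Int) (fuel : Nat) : Int × PySem.Dict Int Int :=
    match rem with
    | [] => (total, memo)
    | (g, sign) :: rest =>
      if g > n then (total, memo)
      else
        match PySem.Dict.get? memo (n - g) with
        | some v => pvB_loop gp mv memo n rest (total + sign * v) fuel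
        | none =>
          let r := pvB_p gp mv memo (n - g) fuel
          pvB_loop gp mv r.2 n rest (total + sign * r.1) fuel
  termination_by (fuel, rem.length + 1)
end

def coin_pile_combos_theorem_alt (limit : Int) (mod_value : Int) : List Int :=
  let gpents := pvB_gpents limit 1 (limit.toNat + 1)
  let memo : PySem.Dict Int Int := PySem.Dict.insert PySem.Dict.empty 0 1  -- {0: 1}
  let res := (PySem.List.pyRange 1 (limit + 1) 1).foldl
    (fun (st : List Int × PySem.Dict Int Int) n =>
      let r := pvB_p gpents mod_value st.2 n n.toNat
      (st.1 ++ [r.1], r.2))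
    ([], memo)
  1 :: res.1

-- ===== PRECONDITION & SPEC =====
-- A raises ZeroDivisionError (count % 0) exactly when limit ≥ 1 and mod_value = 0;
-- B raises there too.  Everywhere else A returns normally.
def Pre_coin_pile_combos_theorem (limit : Int) (mod_value : Int) : Prop :=
  mod_value ≠ 0 ∨ limit ≤ 0
instance (limit : Int) (mod_value : Int) : Decidable (Pre_coin_pile_combos_theorem limit mod_value) := by
  unfold Pre_coin_pile_combos_theorem; infer_instance
def pvWitness_coin_pile_combos_theorem : Int × Int := (6, 97)

def Spec_coin_pile_combos_theorem (limit : Int) (mod_value : Int) (out : List Int) : Prop := out = coin_pile_combos_theorem_alt limit mod_value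
instance (limit : Int) (mod_value : Int) (out : List Int) : Decidable (Spec_coin_pile_combos_theorem limit mod_value out) := by unfold Spec_coin_pile_combos_theorem; infer_instance

-- ===== CLAIM (what is proved, stated in full; the proofs are below) =====
def Claim_equal_coin_pile_combos_theorem : Prop := ∀ (limit : Int) (mod_value : Int), Dom_coin_pile_combos_theorem limit mod_value → Pre_coin_pile_combos_theorem limit mod_value → Spec_coin_pile_combos_theorem limit mod_value (coin_pile_combos_theorem limit mod_value)

-- ===== LEMMAS AND PROOFS =====

def pvPent (j : Int) : Int := PySem.Int.floordiv (j * (3 * j - 1)) 2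

lemma pvPent2_eq (j : Int) :
    PySem.Int.floordiv (j * (3 * j + 1)) 2 = pvPent j + j := by
  unfold pvPent
  rw [PySem.Int.floordiv_eq_ediv_of_pos (by omega), PySem.Int.floordiv_eq_ediv_of_pos (by omega)]
  have h : j * (3 * j + 1) = j * (3 * j - 1) + j * 2 := by ring
  rw [h, Int.add_mul_ediv_right _ _ (by omega)]

lemma pvPent_succ (j : Int) : pvPent (j + 1) = pvPent j + (3 * j + 1) := by
  unfold pvPent
  rw [PySem.Int.floordiv_eq_ediv_of_pos (by omega), PySem.Int.floordiv_eq_ediv_of_pos (by omega)]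
  have h : (j + 1) * (3 * (j + 1) - 1) = j * (3 * j - 1) + (3 * j + 1) * 2 := by ring
  rw [h, Int.add_mul_ediv_right _ _ (by omega)]

lemma pvPent_neg (j : Int) :
    PySem.Int.floordiv ((j * -1) * (3 * (j * -1) - 1)) 2
      = PySem.Int.floordiv (j * (3 * j + 1)) 2 := by
  have h : (j * -1) * (3 * (j * -1) - 1) = j * (3 * j + 1) := by ring
  rw [h]

lemma pvPent_ge (j : Int) (hj : 1 ≤ j) : j ≤ pvPent j := by
  induction j, hj using Int.le_induction with
  | base => decide
  | succ m hm ih => rw [pvPent_succ]; omega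

lemma pvMod_neg_two (j : Int) : PySem.Int.mod (j * -1) 2 = PySem.Int.mod j 2 := by
  rw [PySem.Int.mod_eq_emod_of_pos (by omega), PySem.Int.mod_eq_emod_of_pos (by omega)]
  have h : j * -1 = -j := by ring
  rw [h, Int.neg_emod_two]

lemma pv_sign_step (k c F : Int) :
    (if PySem.Int.mod k 2 = 1 then c + F else c - F)
      = c + (if PySem.Int.mod k 2 = 1 then (1:Int) else -1) * F := by
  split_ifs <;> ring

lemma pvA_inner_stop (partitions : List Int) (n c k : Int) (f : Nat)
    (h : PySem.Int.floordiv (k * (3 * k - 1)) 2 > n) :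
    pvA_inner partitions n c k (f + 1) = c := by
  simp only [pvA_inner, if_pos h]

lemma pvA_inner_step (partitions : List Int) (n c k : Int) (f : Nat)
    (h : ¬ PySem.Int.floordiv (k * (3 * k - 1)) 2 > n) :
    pvA_inner partitions n c k (f + 1)
      = pvA_inner partitions n
          (c + (if PySem.Int.mod k 2 = 1 then 1 else -1)
                * PySem.List.pyGetD partitions (n - PySem.Int.floordiv (k * (3 * k - 1)) 2) 0)
          (if k * -1 > 0 then k * -1 + 1 else k * -1) f := by
  simp only [pvA_inner, if_neg h, pv_sign_step]

lemma pvB_gpents_nil (limit j : Int) (h : ¬ PySem.Int.floordiv (j * (3 * j - 1)) 2 ≤ limit)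
    (fuel : Nat) : pvB_gpents limit j fuel = [] := by
  cases fuel with
  | zero => rfl
  | succ f => simp only [pvB_gpents, if_neg h]

lemma pvB_loop_nil (gp : List (Int × Int)) (mv : Int) (memo : PySem.Dict Int Int)
    (n total : Int) (fuel : Nat) :
    pvB_loop gp mv memo n [] total fuel = (total, memo) := by
  simp [pvB_loop]

lemma pvB_loop_cons_gt (gp : List (Int × Int)) (mv : Int) (memo : PySem.Dict Int Int)
    (n g s total : Int) (rest : List (Int × Int)) (fuel : Nat) (h : g > n) :
    pvB_loop gp mv memo n ((g, s) :: rest) total fuel = (total, memo) := by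
  simp only [pvB_loop, if_pos h]

lemma pvB_loop_cons_hit (gp : List (Int × Int)) (mv : Int) (memo : PySem.Dict Int Int)
    (n g s total v : Int) (rest : List (Int × Int)) (fuel : Nat) (h : ¬ g > n)
    (hv : PySem.Dict.get? memo (n - g) = some v) :
    pvB_loop gp mv memo n ((g, s) :: rest) total fuel
      = pvB_loop gp mv memo n rest (total + s * v) fuel := by
  rw [pvB_loop.eq_def]
  simp only [if_neg h, hv]

lemma pvB_p_miss (gp : List (Int × Int)) (mv : Int) (memo : PySem.Dict Int Int)
    (n : Int) (f : Nat) (h : PySem.Dict.get? memo n = none) :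
    pvB_p gp mv memo n (f + 1)
      = (PySem.Int.mod (pvB_loop gp mv memo n gp 0 f).1 mv,
         PySem.Dict.insert (pvB_loop gp mv memo n gp 0 f).2 n
           (PySem.Int.mod (pvB_loop gp mv memo n gp 0 f).1 mv)) := by
  rw [pvB_p.eq_def, h]

lemma pvB_gpents_cons2 (limit j : Int) (fuel : Nat)
    (h1 : PySem.Int.floordiv (j * (3 * j - 1)) 2 ≤ limit)
    (h2 : PySem.Int.floordiv (j * (3 * j + 1)) 2 ≤ limit) :
    pvB_gpents limit j (fuel + 1)
      = (PySem.Int.floordiv (j * (3 * j - 1)) 2, if PySem.Int.mod j 2 = 1 then 1 else -1)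
        :: (PySem.Int.floordiv (j * (3 * j + 1)) 2, if PySem.Int.mod j 2 = 1 then 1 else -1)
        :: pvB_gpents limit (j + 1) fuel := by
  simp only [pvB_gpents, if_pos h1, if_pos h2, List.cons_append, List.nil_append]

lemma pvB_gpents_cons1 (limit j : Int) (fuel : Nat)
    (h1 : PySem.Int.floordiv (j * (3 * j - 1)) 2 ≤ limit)
    (h2 : ¬ PySem.Int.floordiv (j * (3 * j + 1)) 2 ≤ limit) :
    pvB_gpents limit j (fuel + 1)
      = (PySem.Int.floordiv (j * (3 * j - 1)) 2, if PySem.Int.mod j 2 = 1 then 1 else -1)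
        :: pvB_gpents limit (j + 1) fuel := by
  simp only [pvB_gpents, if_pos h1, if_neg h2, List.cons_append, List.nil_append]

lemma pv_inner_eq (partitions : List Int) (memo : PySem.Dict Int Int)
    (gp : List (Int × Int)) (mv limit n : Int)
    (_hn1 : 1 ≤ n) (hnl : n ≤ limit)
    (hmemo : ∀ i : Int, 0 ≤ i → i < n →
      PySem.Dict.get? memo i = some (PySem.List.pyGetD partitions i 0)) :
    ∀ (fuelG : Nat) (j total : Int) (fuelA fuelB : Nat),
      1 ≤ j → limit + 2 ≤ j + fuelG → 2 * (n + 2 - j).toNat ≤ fuelA →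
      pvB_loop gp mv memo n (pvB_gpents limit j fuelG) total fuelB
        = (pvA_inner partitions n total j fuelA, memo) := by
  intro fuelG
  induction fuelG with
  | zero =>
    intro j total fuelA fuelB hj hfg _
    have hp : PySem.Int.floordiv (j * (3 * j - 1)) 2 > n :=
      lt_of_lt_of_le (by omega : n < j) (pvPent_ge j hj)
    rw [show pvB_gpents limit j 0 = [] from rfl, pvB_loop_nil]
    cases fuelA with
    | zero => rfl
    | succ f => rw [pvA_inner_stop _ _ _ _ _ hp]
  | succ fuelG ih =>
    intro j total fuelA fuelB hj hfg hfa
    have hg2eq : PySem.Int.floordiv (j * (3 * j + 1)) 2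
        = PySem.Int.floordiv (j * (3 * j - 1)) 2 + j := pvPent2_eq j
    have hsucc : PySem.Int.floordiv ((j + 1) * (3 * (j + 1) - 1)) 2
        = PySem.Int.floordiv (j * (3 * j - 1)) 2 + (3 * j + 1) := pvPent_succ j
    have hpj : j ≤ PySem.Int.floordiv (j * (3 * j - 1)) 2 := pvPent_ge j hj
    by_cases hg1 : PySem.Int.floordiv (j * (3 * j - 1)) 2 ≤ limit
    · by_cases hg1n : PySem.Int.floordiv (j * (3 * j - 1)) 2 > n
      · -- A stops immediately, B breaks at the head
        have hA : pvA_inner partitions n total j fuelA = total := by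
          cases fuelA with
          | zero => rfl
          | succ f => rw [pvA_inner_stop _ _ _ _ _ hg1n]
        rw [hA]
        by_cases hg2 : PySem.Int.floordiv (j * (3 * j + 1)) 2 ≤ limit
        · rw [pvB_gpents_cons2 _ _ _ hg1 hg2, pvB_loop_cons_gt _ _ _ _ _ _ _ _ _ hg1n]
        · rw [pvB_gpents_cons1 _ _ _ hg1 hg2, pvB_loop_cons_gt _ _ _ _ _ _ _ _ _ hg1n]
      · -- g1 ≤ n : both consume the first pentagonal number
        have hjn : j ≤ n := le_trans hpj (by omega)
        obtain ⟨f2, rfl⟩ : ∃ f2, fuelA = f2 + 2 := ⟨fuelA - 2, by omega⟩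
        have hhit1 := hmemo (n - PySem.Int.floordiv (j * (3 * j - 1)) 2)
          (by omega) (by omega)
        rw [pvA_inner_step _ _ _ _ _ hg1n, if_neg (by omega : ¬ j * -1 > 0)]
        by_cases hg2 : PySem.Int.floordiv (j * (3 * j + 1)) 2 ≤ limit
        · rw [pvB_gpents_cons2 _ _ _ hg1 hg2,
              pvB_loop_cons_hit _ _ _ _ _ _ _ _ _ _ (by omega) hhit1]
          by_cases hg2n : PySem.Int.floordiv (j * (3 * j + 1)) 2 > n
          · -- second pentagonal exceeds n: both stop
            rw [pvB_loop_cons_gt _ _ _ _ _ _ _ _ _ hg2n,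
                pvA_inner_stop _ _ _ _ _ (by rw [pvPent_neg]; exact hg2n)]
          · -- both consume the second pentagonal number too, then continue at j + 1
            have hhit2 := hmemo (n - PySem.Int.floordiv (j * (3 * j + 1)) 2)
              (by omega) (by omega)
            rw [pvB_loop_cons_hit _ _ _ _ _ _ _ _ _ _ hg2n hhit2,
                pvA_inner_step _ _ _ _ _ (by rw [pvPent_neg]; exact hg2n),
                pvPent_neg, pvMod_neg_two,
                show (j * -1) * -1 = j from by ring,
                if_pos (by omega : j > 0)]
            exact ih (j + 1) _ f2 fuelB (by omega) (by omega) (by omega)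
        · -- second pentagonal exceeds the limit: B's tail list is empty, A stops
          have hnil : pvB_gpents limit (j + 1) fuelG = [] :=
            pvB_gpents_nil _ _ (by omega) _
          rw [pvB_gpents_cons1 _ _ _ hg1 hg2,
              pvB_loop_cons_hit _ _ _ _ _ _ _ _ _ _ (by omega) hhit1, hnil, pvB_loop_nil,
              pvA_inner_stop _ _ _ _ _ (by rw [pvPent_neg]; omega)]
    · -- even the first pentagonal number exceeds the limit (hence n): nothing happens
      have hA : pvA_inner partitions n total j fuelA = total := by
        cases fuelA with
        | zero => rfl
        | succ f => rw [pvA_inner_stop _ _ _ _ _ (by omega)]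
      rw [pvB_gpents_nil _ _ hg1 _, pvB_loop_nil, hA]

def pvStepA (mv : Int) (partitions : List Int) (n : Int) : List Int :=
  PySem.List.pySetD partitions n
    (PySem.Int.mod (pvA_inner partitions n 0 1 (2 * n.toNat + 2)) mv)

def pvStepB (gp : List (Int × Int)) (mv : Int) (st : List Int × PySem.Dict Int Int)
    (n : Int) : List Int × PySem.Dict Int Int :=
  (st.1 ++ [(pvB_p gp mv st.2 n n.toNat).1], (pvB_p gp mv st.2 n n.toNat).2)

def pvFA (limit mv m : Int) : List Int :=
  (PySem.List.pyRange 1 (m + 1) 1).foldl (pvStepA mv) (1 :: List.replicate limit.toNat 0)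

def pvFB (limit mv m : Int) : List Int × PySem.Dict Int Int :=
  (PySem.List.pyRange 1 (m + 1) 1).foldl
    (pvStepB (pvB_gpents limit 1 (limit.toNat + 1)) mv)
    ([], PySem.Dict.insert PySem.Dict.empty 0 1)

lemma pv_portA_eq (limit mv : Int) : coin_pile_combos_theorem limit mv = pvFA limit mv limit := rfl

lemma pv_portB_eq (limit mv : Int) :
    coin_pile_combos_theorem_alt limit mv = 1 :: (pvFB limit mv limit).1 := rfl

lemma pv_getD_setD (xs : List Int) (nI i v : Int) (h0 : 0 ≤ nI)
    (hlen : nI < (xs.length : Int)) (hi : 0 ≤ i) :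
    PySem.List.pyGetD (PySem.List.pySetD xs nI v) i 0
      = if i = nI then v else PySem.List.pyGetD xs i 0 := by
  rw [PySem.List.pySetD_of_nonneg _ _ h0,
      ← Int.toNat_of_nonneg hi, PySem.List.pyGetD_natCast, PySem.List.pyGetD_natCast]
  rcases eq_or_ne i nI with h | h
  · subst h
    rw [if_pos (by omega : ((i.toNat : Int)) = i)]
    have hlt : i.toNat < xs.length := by omega
    simp [List.getD_eq_getElem?_getD, hlt]
  · rw [if_neg (by omega : ¬ ((i.toNat : Int)) = nI)]
    have hne : nI.toNat ≠ i.toNat := by omega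
    simp [List.getD_eq_getElem?_getD, hne]

lemma pv_outer (limit mv : Int) :
    ∀ t : Nat, (t : Int) ≤ limit →
      (pvFA limit mv t).length = limit.toNat + 1 ∧
      PySem.List.pyGetD (pvFA limit mv t) 0 0 = 1 ∧
      (∀ i : Int, 0 ≤ i → i ≤ (t : Int) →
        PySem.Dict.get? (pvFB limit mv t).2 i
          = some (PySem.List.pyGetD (pvFA limit mv t) i 0)) ∧
      (∀ i : Int, (t : Int) < i → PySem.Dict.get? (pvFB limit mv t).2 i = none) ∧
      (pvFB limit mv t).1 = (PySem.List.pyRange 1 ((t : Int) + 1) 1).map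
          (fun i => PySem.List.pyGetD (pvFA limit mv t) i 0) := by
  intro t
  induction t with
  | zero =>
    intro _
    have hr : PySem.List.pyRange 1 (((0:Nat) : Int) + 1) 1 = [] := by
      apply PySem.List.pyRange_one_eq_nil; omega
    refine ⟨?_, ?_, ?_, ?_, ?_⟩
    · simp [pvFA]
    · simp [pvFA, PySem.List.pyGetD_zero_cons]
    · intro i hi0 hi1
      have : i = 0 := by omega
      subst this
      simp [pvFA, pvFB, PySem.Dict.get?_insert_self, PySem.List.pyGetD_zero_cons]
    · intro i hgt
      simp only [pvFB, hr, List.foldl_nil]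
      rw [PySem.Dict.get?_insert_of_ne _ _ (by omega : i ≠ 0)]
      exact PySem.Dict.get?_empty i
    · simp [pvFB]
  | succ t ih =>
    intro ht
    have hc : ((t + 1 : Nat) : Int) = (t : Int) + 1 := by push_cast; ring
    have ht' : (t : Int) ≤ limit := by omega
    obtain ⟨hlen, hzero, hget, hnone, hout⟩ := ih ht'
    have hn1 : (1 : Int) ≤ (t : Int) + 1 := by omega
    have hstepA : pvFA limit mv ((t + 1 : Nat) : Int)
        = pvStepA mv (pvFA limit mv t) ((t : Int) + 1) := by
      unfold pvFA
      rw [hc, PySem.List.pyRange_one_succ_right (by omega : (1:Int) ≤ (t : Int) + 1),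
          List.foldl_append]
      rfl
    have hstepB : pvFB limit mv ((t + 1 : Nat) : Int)
        = pvStepB (pvB_gpents limit 1 (limit.toNat + 1)) mv (pvFB limit mv t)
            ((t : Int) + 1) := by
      unfold pvFB
      rw [hc, PySem.List.pyRange_one_succ_right (by omega : (1:Int) ≤ (t : Int) + 1),
          List.foldl_append]
      rfl
    -- evaluate B's step: a memo miss followed by the inner loop
    have hmiss : PySem.Dict.get? (pvFB limit mv t).2 ((t : Int) + 1) = none :=
      hnone _ (by omega)
    have hnt : ((t : Int) + 1).toNat = t + 1 := by omega
    have hL := pv_inner_eq (pvFA limit mv t) (pvFB limit mv t).2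
      (pvB_gpents limit 1 (limit.toNat + 1)) mv limit ((t : Int) + 1)
      hn1 (by omega)
      (fun i hi hin => hget i hi (by omega))
      (limit.toNat + 1) 1 0 (2 * ((t : Int) + 1).toNat + 2) t
      (by omega) (by omega) (by omega)
    have hp : pvB_p (pvB_gpents limit 1 (limit.toNat + 1)) mv (pvFB limit mv t).2
        ((t : Int) + 1) (((t : Int) + 1).toNat)
        = (PySem.Int.mod (pvA_inner (pvFA limit mv t) ((t : Int) + 1) 0 1
              (2 * ((t : Int) + 1).toNat + 2)) mv,
           PySem.Dict.insert (pvFB limit mv t).2 ((t : Int) + 1)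
             (PySem.Int.mod (pvA_inner (pvFA limit mv t) ((t : Int) + 1) 0 1
              (2 * ((t : Int) + 1).toNat + 2)) mv)) := by
      rw [hnt, pvB_p_miss _ _ _ _ _ hmiss, hL]
      simp [hnt]
    have hAstep : pvFA limit mv ((t + 1 : Nat) : Int)
        = PySem.List.pySetD (pvFA limit mv t) ((t : Int) + 1)
            (PySem.Int.mod (pvA_inner (pvFA limit mv t) ((t : Int) + 1) 0 1
              (2 * ((t : Int) + 1).toNat + 2)) mv) := by
      rw [hstepA]; rfl
    have hBstep1 : (pvFB limit mv ((t + 1 : Nat) : Int)).1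
        = (pvFB limit mv t).1 ++ [PySem.Int.mod (pvA_inner (pvFA limit mv t)
            ((t : Int) + 1) 0 1 (2 * ((t : Int) + 1).toNat + 2)) mv] := by
      rw [hstepB]; unfold pvStepB; rw [hp]
    have hBstep2 : (pvFB limit mv ((t + 1 : Nat) : Int)).2
        = PySem.Dict.insert (pvFB limit mv t).2 ((t : Int) + 1)
            (PySem.Int.mod (pvA_inner (pvFA limit mv t) ((t : Int) + 1) 0 1
              (2 * ((t : Int) + 1).toNat + 2)) mv) := by
      rw [hstepB]; unfold pvStepB; rw [hp]
    have hn_lt_len : (t : Int) + 1 < ((pvFA limit mv t).length : Int) := by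
      rw [hlen]; push_cast; omega
    refine ⟨?_, ?_, ?_, ?_, ?_⟩
    · rw [hAstep, PySem.List.length_pySetD]; exact hlen
    · rw [hAstep, pv_getD_setD _ _ _ _ (by omega) hn_lt_len (le_refl 0),
          if_neg (by omega)]
      exact hzero
    · intro i hi0 hile
      rw [hBstep2, hAstep, PySem.Dict.get?_insert,
          pv_getD_setD _ _ _ _ (by omega) hn_lt_len hi0]
      rcases eq_or_ne i ((t : Int) + 1) with h | h
      · rw [if_pos h, if_pos h]
      · rw [if_neg h, if_neg h, hget i hi0 (by omega)]
    · intro i hgt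
      rw [hBstep2, PySem.Dict.get?_insert_of_ne _ _ (by omega : i ≠ (t : Int) + 1)]
      exact hnone i (by omega)
    · rw [hBstep1, hAstep, hc,
          PySem.List.pyRange_one_succ_right (by omega : (1:Int) ≤ (t : Int) + 1),
          List.map_append, hout]
      congr 1
      · apply List.map_congr_left
        intro a ha
        rw [PySem.List.mem_pyRange_one] at ha
        rw [pv_getD_setD _ _ _ _ (by omega) hn_lt_len (by omega), if_neg (by omega)]
      · simp only [List.map_cons, List.map_nil]
        rw [pv_getD_setD _ _ _ _ (by omega) hn_lt_len (by omega), if_pos rfl]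

-- ===== VERDICT (by name: the statement is the Claim_ definition above) =====
theorem coin_pile_combos_theorem_spec : Claim_equal_coin_pile_combos_theorem := by
  intro limit mv _ _
  unfold Spec_coin_pile_combos_theorem
  by_cases hl : limit ≤ 0
  · rw [pv_portA_eq, pv_portB_eq]
    unfold pvFA pvFB
    rw [PySem.List.pyRange_one_eq_nil (by omega)]
    simp [show limit.toNat = 0 from by omega]
  · push_neg at hl
    obtain ⟨hlen, hzero, hget, hnone, hout⟩ := pv_outer limit mv limit.toNat (by omega)
    have hcast : ((limit.toNat : Nat) : Int) = limit := by omega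
    rw [hcast] at hlen hzero hout
    rw [pv_portA_eq, pv_portB_eq, hout]
    have h1 := PySem.List.map_pyGetD_pyRange_zero' (pvFA limit mv limit) (0 : Int)
    rw [show ((pvFA limit mv limit).length : Int) = limit + 1 from by
          rw [hlen]; push_cast; omega] at h1
    rw [PySem.List.pyRange_one_cons (by omega : (0:Int) < limit + 1), List.map_cons,
        hzero] at h1
    exact h1.symm
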